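-- pv_equiv track=rewrite | github.com/mostafachegeni/Cardano-SSM-Untangling | cardano_ssm_untangling.py | get_elements_at_set_bits
-- ===== SOURCE A (Python) =====
-- def get_elements_at_set_bits(input_list, number):
--     result = []
--     index = 0
--
--     while number > 0:
--         # Check if the least significant bit of the number is set
--         if number & 1:
--             # Check if the index is within the bounds of the list
--             if index < len(input_list):
--                 result.append(input_list[index])
--
--         # Shift the number to the right to check the next bit
--         number >>= 1
--         # Increment the index to move to the next element in the list
--         index += 1
--
--     return result
-- ===== SOURCE B (Python) =====
-- def get_elements_at_set_bits(input_list, number):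
--     # Kernighan-style: visit only the SET bits of number, skipping zero runs.
--     result = []
--     length = len(input_list)
--     while number > 0:
--         i = (number ^ (number - 1)).bit_length() - 1  # position of lowest set bit
--         if i >= length:
--             break                                     # all remaining set bits are out of range
--         result.append(input_list[i])
--         number &= number - 1                          # clear the lowest set bit
--     return result
-- ===== Notes on version B (the rewrite author's own statement) =====
-- stated objective: alternative
-- what changed: Instead of A's loop that shifts the whole mask right one bit at a time while tracking a parallel index, B repeatedly isolates the lowest set bit ((n^(n-1)).bit_length()-1 gives its position), indexes the list there directly, clears it with n&=n-1, and breaks early once a set-bit position reaches the list length, so only set bits (and none past the list) are visited.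
import Mathlib
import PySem

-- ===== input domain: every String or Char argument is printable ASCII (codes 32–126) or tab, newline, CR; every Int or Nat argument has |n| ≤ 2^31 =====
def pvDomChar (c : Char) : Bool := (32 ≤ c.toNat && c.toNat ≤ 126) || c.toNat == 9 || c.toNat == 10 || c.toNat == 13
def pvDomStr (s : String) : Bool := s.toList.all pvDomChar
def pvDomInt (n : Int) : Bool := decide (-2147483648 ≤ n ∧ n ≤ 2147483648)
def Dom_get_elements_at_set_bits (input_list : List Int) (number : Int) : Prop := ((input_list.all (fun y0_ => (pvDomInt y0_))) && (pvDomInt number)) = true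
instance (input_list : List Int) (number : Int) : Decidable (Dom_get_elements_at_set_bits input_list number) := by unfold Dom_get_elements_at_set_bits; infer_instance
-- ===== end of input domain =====

-- B replaces A's bit-by-bit mask-shifting loop with Kernighan-style extraction that
-- visits only the SET bits (isolate lowest set bit, index directly, clear it, early
-- break once the bit position passes the list length): a different algorithm.


-- ===== PORT A =====
-- A's while-loop: state (number, index, result); appends input_list[index] when the
-- low bit of number is set and index is in bounds; number >>= 1, index += 1 each step.
-- (index is always in bounds when the element is read, so List.getD is exact here.)
def pvLoopA (l : List Int) (n : Int) (idx : Nat) (acc : List Int) : List Int :=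
  if _h : 0 < n then
    pvLoopA l (n >>> (1:Nat)) (idx + 1)
      (if PySem.Int.band n 1 ≠ 0 then
        (if idx < l.length then acc ++ [l.getD idx 0] else acc)
       else acc)
  else acc
termination_by n.toNat
decreasing_by
  rw [Int.shiftRight_eq_div_pow]; omega

def get_elements_at_set_bits (input_list : List Int) (number : Int) : List Int :=
  pvLoopA input_list number 0 []

-- ===== PORT B =====
-- termination fact for B's loop: clearing the lowest set bit shrinks a positive number
theorem pvBandDec (n : Int) (h : 0 < n) : (PySem.Int.band n (n - 1)).toNat < n.toNat := by
  rw [PySem.Int.band_of_nonneg (by omega) (by omega)]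
  have h1 : n.toNat &&& (n - 1).toNat ≤ (n - 1).toNat := Nat.and_le_right
  omega

-- B's loop: isolate the lowest set bit of n via (n ^ (n-1)).bit_length() - 1, read
-- input_list at that position (in bounds, so List.getD is exact), clear the bit with
-- n & (n-1), and break as soon as the position reaches the list length.
def pvLoopB (l : List Int) (length : Nat) (n : Int) (acc : List Int) : List Int :=
  if _h : 0 < n then
    let i : Int := (PySem.Int.bitLength (PySem.Int.bxor n (n - 1)) : Int) - 1
    if (length : Int) ≤ i then acc
    else pvLoopB l length (PySem.Int.band n (n - 1)) (acc ++ [l.getD i.toNat 0])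
  else acc
termination_by n.toNat
decreasing_by exact pvBandDec n _h

def get_elements_at_set_bits_alt (input_list : List Int) (number : Int) : List Int :=
  pvLoopB input_list input_list.length number []

-- ===== PRECONDITION & SPEC =====
def Spec_get_elements_at_set_bits (input_list : List Int) (number : Int) (out : List Int) : Prop := out = get_elements_at_set_bits_alt input_list number
instance (input_list : List Int) (number : Int) (out : List Int) : Decidable (Spec_get_elements_at_set_bits input_list number out) := by unfold Spec_get_elements_at_set_bits; infer_instance

-- ===== CLAIM (what is proved, stated in full; the proofs are below) =====
def Claim_equal_get_elements_at_set_bits : Prop := ∀ (input_list : List Int) (number : Int), Dom_get_elements_at_set_bits input_list number → Spec_get_elements_at_set_bits input_list number (get_elements_at_set_bits input_list number)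

-- ===== LEMMAS AND PROOFS =====

-- Common reference function: elements of l at positions where the binary digit of n is 1.
def pvSpec : List Int → Nat → List Int
  | [], _ => []
  | x :: xs, n => (if n % 2 = 1 then [x] else []) ++ pvSpec xs (n / 2)

theorem pvSpec_zero (l : List Int) : pvSpec l 0 = [] := by
  induction l with
  | nil => rfl
  | cons x xs ih => simp [pvSpec, ih]

-- ---- bit identities over Nat ----

theorem pvXor_odd (m : Nat) (hm : m % 2 = 1) : m ^^^ (m - 1) = 1 := by
  apply Nat.eq_of_testBit_eq
  intro j
  have hm0 : (m - 1) % 2 = 0 := by omega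
  have hd : (m - 1) / 2 = m / 2 := by omega
  cases j with
  | zero => simp [Nat.testBit_zero]; omega
  | succ j => simp [Nat.testBit_add_one, Nat.xor_div_two, hd, Nat.xor_self, Nat.zero_testBit]

theorem pvAnd_odd (m : Nat) (hm : m % 2 = 1) : m &&& (m - 1) = m - 1 := by
  apply Nat.eq_of_testBit_eq
  intro j
  have hm0 : (m - 1) % 2 = 0 := by omega
  have hd : (m - 1) / 2 = m / 2 := by omega
  cases j with
  | zero => simp [Nat.testBit_zero]; omega
  | succ j => simp [Nat.testBit_add_one, Nat.and_div_two, hd, Nat.and_self]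

theorem pvXor_even (k : Nat) (hk : 0 < k) :
    (2 * k) ^^^ (2 * k - 1) = 2 * (k ^^^ (k - 1)) + 1 := by
  apply Nat.eq_of_testBit_eq
  intro j
  have e0 : (2 * k) % 2 = 0 := by omega
  have e1 : (2 * k - 1) % 2 = 1 := by omega
  have e2 : (2 * (k ^^^ (k - 1)) + 1) % 2 = 1 := by omega
  have h1 : (2 * k) / 2 = k := by omega
  have h2 : (2 * k - 1) / 2 = k - 1 := by omega
  have h3 : (2 * (k ^^^ (k - 1)) + 1) / 2 = k ^^^ (k - 1) := by omega
  cases j with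
  | zero => simp [Nat.testBit_zero, e1, e2]
  | succ j => simp [Nat.testBit_add_one, Nat.xor_div_two, h1, h2, h3]

theorem pvAnd_even (k : Nat) (hk : 0 < k) :
    (2 * k) &&& (2 * k - 1) = 2 * (k &&& (k - 1)) := by
  apply Nat.eq_of_testBit_eq
  intro j
  have e0 : (2 * k) % 2 = 0 := by omega
  have e1 : (2 * k - 1) % 2 = 1 := by omega
  have e2 : (2 * (k &&& (k - 1))) % 2 = 0 := by omega
  have h1 : (2 * k) / 2 = k := by omega
  have h2 : (2 * k - 1) / 2 = k - 1 := by omega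
  have h3 : (2 * (k &&& (k - 1))) / 2 = k &&& (k - 1) := by omega
  cases j with
  | zero => simp [Nat.testBit_zero, e0, e1, e2]
  | succ j => simp [Nat.testBit_add_one, Nat.and_div_two, h1, h2, h3]

theorem pvXor_pow (i m : Nat) (hm : m % 2 = 1) :
    (2 ^ i * m) ^^^ (2 ^ i * m - 1) = 2 ^ (i + 1) - 1 := by
  induction i with
  | zero => simpa using pvXor_odd m hm
  | succ i ih =>
    have hpos : 0 < 2 ^ i * m := Nat.mul_pos (Nat.two_pow_pos i) (by omega)
    have e : 2 ^ (i + 1) * m = 2 * (2 ^ i * m) := by ring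
    rw [e, pvXor_even _ hpos, ih]
    have h1 : 2 ^ (i + 1 + 1) = 2 * 2 ^ (i + 1) := by ring
    have h2 : 1 ≤ 2 ^ (i + 1) := Nat.one_le_two_pow
    omega

theorem pvAnd_pow (i m : Nat) (hm : m % 2 = 1) :
    (2 ^ i * m) &&& (2 ^ i * m - 1) = 2 ^ i * (m - 1) := by
  induction i with
  | zero => simpa using pvAnd_odd m hm
  | succ i ih =>
    have hpos : 0 < 2 ^ i * m := Nat.mul_pos (Nat.two_pow_pos i) (by omega)
    have e : 2 ^ (i + 1) * m = 2 * (2 ^ i * m) := by ring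
    rw [e, pvAnd_even _ hpos, ih]
    ring

-- bit_length of 2^(i+1) - 1 is i+1
theorem pvBL_pow (i : Nat) : PySem.Int.bitLength ((2 ^ (i + 1) - 1 : Nat) : Int) = i + 1 := by
  induction i with
  | zero =>
    have e : (2 ^ (0 + 1) - 1 : Nat) = 1 := by norm_num
    rw [e, PySem.Int.bitLength_natCast (by norm_num : (0:Nat) < 1)]
    norm_num [PySem.Int.bitLength_zero]
  | succ i ih =>
    have hpos : 0 < 2 ^ (i + 1 + 1) - 1 := by
      have : 2 ≤ 2 ^ (i + 1 + 1) := Nat.one_lt_two_pow_iff.mpr (by omega)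
      omega
    rw [PySem.Int.bitLength_natCast hpos]
    have hdiv : (2 ^ (i + 1 + 1) - 1) / 2 = 2 ^ (i + 1) - 1 := by
      have : 2 ^ (i + 1 + 1) = 2 * 2 ^ (i + 1) := by ring
      have h2 : 1 ≤ 2 ^ (i + 1) := Nat.one_le_two_pow
      omega
    rw [hdiv, ih]

-- selecting with the low bit cleared beyond the list contributes nothing
theorem pvSpec_high (l : List Int) (i m : Nat) (h : l.length ≤ i) :
    pvSpec l (2 ^ i * m) = [] := by
  induction l generalizing i m with
  | nil => rfl
  | cons x xs ih =>
    cases i with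
    | zero => simp at h
    | succ i =>
      have h2 : (2 ^ (i + 1) * m) % 2 = 0 := by
        have : 2 ^ (i + 1) * m = 2 * (2 ^ i * m) := by ring
        omega
      have h3 : (2 ^ (i + 1) * m) / 2 = 2 ^ i * m := by
        have : 2 ^ (i + 1) * m = 2 * (2 ^ i * m) := by ring
        omega
      simp only [pvSpec, h2, h3]
      simp [ih i m (by simpa using h)]

-- one Kernighan step at spec level
theorem pvSpec_step (i : Nat) (l : List Int) (m : Nat) (hm : m % 2 = 1) :
    pvSpec l (2 ^ i * m) =
      (if i < l.length then [l.getD i 0] else []) ++ pvSpec l (2 ^ i * (m - 1)) := by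
  induction i generalizing l with
  | zero =>
    cases l with
    | nil => simp [pvSpec]
    | cons x xs =>
      have h2 : (m - 1) % 2 = 0 := by omega
      have h3 : (m - 1) / 2 = m / 2 := by omega
      simp [pvSpec, hm, h2, h3]
  | succ i ih =>
    cases l with
    | nil => simp [pvSpec]
    | cons x xs =>
      have e1 : ∀ k : Nat, 2 ^ (i + 1) * k = 2 * (2 ^ i * k) := by intro k; ring
      have h2 : (2 ^ (i + 1) * m) % 2 = 0 := by rw [e1]; omega
      have h3 : (2 ^ (i + 1) * m) / 2 = 2 ^ i * m := by rw [e1]; omega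
      have h4 : (2 ^ (i + 1) * (m - 1)) % 2 = 0 := by rw [e1]; omega
      have h5 : (2 ^ (i + 1) * (m - 1)) / 2 = 2 ^ i * (m - 1) := by rw [e1]; omega
      simp only [pvSpec, h2, h3, h4, h5]
      simp [ih xs]

-- ---- B's loop computes pvSpec ----
theorem pvLoopB_eq (l : List Int) (n : Int) (hn : 0 ≤ n) (acc : List Int) :
    pvLoopB l l.length n acc = acc ++ pvSpec l n.toNat := by
  by_cases h : 0 < n
  · obtain ⟨i, m, hmodd, hnm⟩ := Nat.exists_eq_two_pow_mul_odd (n := n.toNat) (by omega)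
    have hm : m % 2 = 1 := Nat.odd_iff.mp hmodd
    have hx : PySem.Int.bxor n (n - 1) = ((2 ^ (i + 1) - 1 : Nat) : Int) := by
      rw [PySem.Int.bxor_of_nonneg (by omega) (by omega)]
      have : (n - 1).toNat = n.toNat - 1 := by omega
      rw [this, hnm, pvXor_pow i m hm]
    have hbl : (PySem.Int.bitLength (PySem.Int.bxor n (n - 1)) : Int) - 1 = (i : Int) := by
      rw [hx, pvBL_pow]; push_cast; ring
    have hband : (PySem.Int.band n (n - 1)).toNat = 2 ^ i * (m - 1) := by
      rw [PySem.Int.band_of_nonneg (by omega) (by omega)]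
      have : (n - 1).toNat = n.toNat - 1 := by omega
      rw [this, hnm, pvAnd_pow i m hm]
      omega
    rw [pvLoopB]
    simp only [h, dite_true, hbl]
    by_cases hge : (l.length : Int) ≤ (i : Int)
    · rw [if_pos hge, hnm, pvSpec_high l i m (by exact_mod_cast hge)]
      simp
    · rw [if_neg hge]
      have hlt : i < l.length := by exact_mod_cast not_le.mp hge
      have hrec := pvLoopB_eq l (PySem.Int.band n (n - 1))
        (PySem.Int.band_nonneg_of_nonneg_left _ (by omega)) (acc ++ [l.getD ((i : Int)).toNat 0])
      rw [hrec, hband, hnm, pvSpec_step i l m hm]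
      simp [hlt]
  · rw [pvLoopB]
    have : n.toNat = 0 := by omega
    simp [h, this, pvSpec_zero]
termination_by n.toNat
decreasing_by rw [hband, hnm]; exact mul_lt_mul_of_pos_left (by omega : m - 1 < m) (Nat.two_pow_pos i)

-- ---- A's loop computes pvSpec ----
theorem pvLoopA_eq (l : List Int) (n : Int) (hn : 0 ≤ n) (idx : Nat) (acc : List Int) :
    pvLoopA l n idx acc = acc ++ pvSpec (l.drop idx) n.toNat := by
  by_cases h : 0 < n
  · rw [pvLoopA]
    simp only [h, dite_true]
    have hsh : (n >>> (1:Nat)).toNat = n.toNat / 2 := by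
      rw [Int.shiftRight_eq_div_pow]; omega
    have hrec := pvLoopA_eq l (n >>> (1:Nat)) (by rw [Int.shiftRight_eq_div_pow]; omega) (idx + 1)
    have hbit : (PySem.Int.band n 1 ≠ 0) ↔ n.toNat % 2 = 1 := by
      rw [PySem.Int.band_one]
      constructor
      · intro hne
        have := PySem.Int.mod_nonneg n (b := 2) (by norm_num)
        have := PySem.Int.mod_lt n (b := 2) (by norm_num)
        have hmd : PySem.Int.mod n 2 = n % 2 := by
          simp [PySem.Int.mod, Int.fmod_eq_emod]
        omega
      · intro hone
        have hmd : PySem.Int.mod n 2 = n % 2 := by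
          simp [PySem.Int.mod, Int.fmod_eq_emod]
        omega
    by_cases hb : n.toNat % 2 = 1
    · rw [if_pos (hbit.mpr hb)]
      by_cases hi : idx < l.length
      · rw [if_pos hi, hrec, hsh]
        have hdrop : l.drop idx = l.getD idx 0 :: l.drop (idx + 1) := by
          rw [List.getD_eq_getElem l 0 hi]
          exact List.drop_eq_getElem_cons hi
        rw [hdrop]
        simp [pvSpec, hb]
      · rw [if_neg hi, hrec, hsh]
        have h1 : l.drop idx = [] := List.drop_eq_nil_of_le (by omega)
        have h2 : l.drop (idx + 1) = [] := List.drop_eq_nil_of_le (by omega)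
        simp [h1, h2, pvSpec]
    · rw [if_neg (by simpa [hbit] using hb), hrec, hsh]
      by_cases hi : idx < l.length
      · have hdrop : l.drop idx = l.getD idx 0 :: l.drop (idx + 1) := by
          rw [List.getD_eq_getElem l 0 hi]
          exact List.drop_eq_getElem_cons hi
        rw [hdrop]
        simp [pvSpec, hb]
      · have h1 : l.drop idx = [] := List.drop_eq_nil_of_le (by omega)
        have h2 : l.drop (idx + 1) = [] := List.drop_eq_nil_of_le (by omega)
        simp [h1, h2, pvSpec]
  · rw [pvLoopA]
    have : n.toNat = 0 := by omega
    simp [h, this, pvSpec_zero]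
termination_by n.toNat
decreasing_by rw [Int.shiftRight_eq_div_pow]; omega

-- ===== VERDICT (by name: the statement is the Claim_ definition above) =====
theorem get_elements_at_set_bits_spec : Claim_equal_get_elements_at_set_bits := by
  intro l n _
  unfold Spec_get_elements_at_set_bits get_elements_at_set_bits get_elements_at_set_bits_alt
  by_cases h : 0 < n
  · rw [pvLoopA_eq l n (by omega) 0 [], pvLoopB_eq l n (by omega) []]
    simp
  · rw [pvLoopA, pvLoopB]; simp [h]
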